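-- pv_equiv track=rewrite | github.com/pypi-data/pypi-mirror-65 | packages/arcovid19/arcovid19-0.4.1.tar.gz/arcovid19-0.4.1/arcovid19.py | get_provincia_name_code
-- ===== SOURCE A (Python) =====
-- import itertools as it
-- import unicodedata
--
-- PROVINCIAS = {
--     'CABA': 'CABA',
--     'Bs As': 'BA',
--     'Córdoba': 'CBA',
--     'San Luis': 'SL',
--     'Chaco': 'CHA',
--     'Río Negro': 'RN',
--     'Santa Fe': 'SF',
--     'Tierra del F': 'TF',
--     'Jujuy': 'JY',
--     'Salta': 'SAL',
--     'Entre Ríos': 'ER',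
--     'Corrientes': 'COR',
--     'Santiago Est': 'SDE',
--     'Neuquen': 'NQ',
--     'Mendoza': 'MDZ',
--     'Tucumán': 'TUC',
--     'Santa Cruz': 'SC',
--     'Chubut': 'CHU',
--     'Misiones': 'MIS',
--     'Formosa': 'FOR',
--     'Catamarca': 'CAT',
--     'La Rioja': 'LAR',
--     'San Juan': 'SJU',
--     'La Pampa': 'LPA'}
--
-- PROVINCIAS_ALIAS = {
--     'Tierra del Fuego': "TF",
--     'Neuquén': "NQ",
--     "Santiago del Estero": "SDE"
-- }
--
-- CODE_TO_POVINCIA = {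
--     v: k for k, v in it.chain(PROVINCIAS.items(), PROVINCIAS_ALIAS.items())}
--
-- def get_provincia_name_code(provincia):
--     """Resolve and validate the name and code of a given provincia
--     name or code.
--
--     """
--     def norm(text):
--         text = text.lower()
--         text = unicodedata.normalize('NFD', text)\
--             .encode('ascii', 'ignore')\
--             .decode("utf-8")
--         return str(text)
--     prov_norm = norm(provincia)
--     for name, code in PROVINCIAS.items():
--         if norm(name) == prov_norm or norm(code) == prov_norm:
--             return CODE_TO_POVINCIA[code], code
--
--     for alias, code in PROVINCIAS_ALIAS.items():
--         if prov_norm == norm(alias):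
--             return CODE_TO_POVINCIA[code], code
--
--     raise ValueError(f"Unknown provincia'{provincia}'")
-- ===== SOURCE B (Python) =====
-- import unicodedata
--
-- # One flat, literal lookup table written out once: normalized provincia
-- # name/code/alias -> (canonical resolved name, code).  Replaces the two
-- # per-call scans over PROVINCIAS / PROVINCIAS_ALIAS with a single dict lookup.
-- _TABLE = {
--     'caba': ('CABA', 'CABA'),
--     'bs as': ('Bs As', 'BA'),
--     'ba': ('Bs As', 'BA'),
--     'cordoba': ('Córdoba', 'CBA'),
--     'cba': ('Córdoba', 'CBA'),
--     'san luis': ('San Luis', 'SL'),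
--     'sl': ('San Luis', 'SL'),
--     'chaco': ('Chaco', 'CHA'),
--     'cha': ('Chaco', 'CHA'),
--     'rio negro': ('Río Negro', 'RN'),
--     'rn': ('Río Negro', 'RN'),
--     'santa fe': ('Santa Fe', 'SF'),
--     'sf': ('Santa Fe', 'SF'),
--     'tierra del f': ('Tierra del Fuego', 'TF'),
--     'tf': ('Tierra del Fuego', 'TF'),
--     'jujuy': ('Jujuy', 'JY'),
--     'jy': ('Jujuy', 'JY'),
--     'salta': ('Salta', 'SAL'),
--     'sal': ('Salta', 'SAL'),
--     'entre rios': ('Entre Ríos', 'ER'),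
--     'er': ('Entre Ríos', 'ER'),
--     'corrientes': ('Corrientes', 'COR'),
--     'cor': ('Corrientes', 'COR'),
--     'santiago est': ('Santiago del Estero', 'SDE'),
--     'sde': ('Santiago del Estero', 'SDE'),
--     'neuquen': ('Neuquén', 'NQ'),
--     'nq': ('Neuquén', 'NQ'),
--     'mendoza': ('Mendoza', 'MDZ'),
--     'mdz': ('Mendoza', 'MDZ'),
--     'tucuman': ('Tucumán', 'TUC'),
--     'tuc': ('Tucumán', 'TUC'),
--     'santa cruz': ('Santa Cruz', 'SC'),
--     'sc': ('Santa Cruz', 'SC'),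
--     'chubut': ('Chubut', 'CHU'),
--     'chu': ('Chubut', 'CHU'),
--     'misiones': ('Misiones', 'MIS'),
--     'mis': ('Misiones', 'MIS'),
--     'formosa': ('Formosa', 'FOR'),
--     'for': ('Formosa', 'FOR'),
--     'catamarca': ('Catamarca', 'CAT'),
--     'cat': ('Catamarca', 'CAT'),
--     'la rioja': ('La Rioja', 'LAR'),
--     'lar': ('La Rioja', 'LAR'),
--     'san juan': ('San Juan', 'SJU'),
--     'sju': ('San Juan', 'SJU'),
--     'la pampa': ('La Pampa', 'LPA'),
--     'lpa': ('La Pampa', 'LPA'),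
--     'tierra del fuego': ('Tierra del Fuego', 'TF'),
--     'santiago del estero': ('Santiago del Estero', 'SDE'),
-- }
--
--
-- def get_provincia_name_code(provincia):
--     """Resolve and validate the name and code of a given provincia
--     name or code.
--
--     """
--     prov_norm = unicodedata.normalize(
--         'NFD', provincia.lower()).encode('ascii', 'ignore').decode('utf-8')
--     try:
--         return _TABLE[prov_norm]
--     except KeyError:
--         raise ValueError(f"Unknown provincia'{provincia}'")
-- ===== Notes on version B (the rewrite author's own statement) =====
-- stated objective: simpler
-- what changed: B replaces A's two per-call scans over PROVINCIAS and PROVINCIAS_ALIAS (which re-normalize every key on every call and resolve names through CODE_TO_POVINCIA) with one hand-written literal dict mapping each normalized name/code/alias directly to its (resolved name, code) pair, so the function body is a single normalization plus one dict lookup.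
import Mathlib
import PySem

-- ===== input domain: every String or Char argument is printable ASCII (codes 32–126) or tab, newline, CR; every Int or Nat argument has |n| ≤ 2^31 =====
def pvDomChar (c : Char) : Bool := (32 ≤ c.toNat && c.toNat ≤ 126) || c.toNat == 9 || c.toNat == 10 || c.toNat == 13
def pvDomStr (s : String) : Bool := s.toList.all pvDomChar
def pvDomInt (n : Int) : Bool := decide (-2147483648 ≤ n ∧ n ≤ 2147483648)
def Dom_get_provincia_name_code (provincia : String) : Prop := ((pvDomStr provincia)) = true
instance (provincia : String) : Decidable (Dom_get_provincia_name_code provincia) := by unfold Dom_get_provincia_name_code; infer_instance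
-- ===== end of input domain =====

-- B replaces A's two per-call scans (each re-normalizing every dict key) with one
-- hand-written literal table from normalized key to (resolved name, code) and a single
-- dict lookup; objective: simpler.

-- ===== PORT A =====

-- module constants (dicts as insertion-ordered association lists)
def PROVINCIAS : List (String × String) :=
  [("CABA", "CABA"), ("Bs As", "BA"), ("Córdoba", "CBA"), ("San Luis", "SL"),
   ("Chaco", "CHA"), ("Río Negro", "RN"), ("Santa Fe", "SF"), ("Tierra del F", "TF"),
   ("Jujuy", "JY"), ("Salta", "SAL"), ("Entre Ríos", "ER"), ("Corrientes", "COR"),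
   ("Santiago Est", "SDE"), ("Neuquen", "NQ"), ("Mendoza", "MDZ"), ("Tucumán", "TUC"),
   ("Santa Cruz", "SC"), ("Chubut", "CHU"), ("Misiones", "MIS"), ("Formosa", "FOR"),
   ("Catamarca", "CAT"), ("La Rioja", "LAR"), ("San Juan", "SJU"), ("La Pampa", "LPA")]

def PROVINCIAS_ALIAS : List (String × String) :=
  [("Tierra del Fuego", "TF"), ("Neuquén", "NQ"), ("Santiago del Estero", "SDE")]

def CODE_TO_POVINCIA : PySem.Dict String String :=
  (PROVINCIAS ++ PROVINCIAS_ALIAS).foldl (fun d kv => d.insert kv.2 kv.1) PySem.Dict.empty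

-- norm(text) = text.lower() then NFD-normalize + encode('ascii','ignore'):
-- hand-ported; exact on ASCII input and on the module's keys, whose only non-ASCII
-- characters are the lowercase accented vowels mapped here (NFD drops their accents).
def pvDeaccent (c : Char) : List Char :=
  if c = 'á' then ['a'] else if c = 'é' then ['e'] else if c = 'í' then ['i']
  else if c = 'ó' then ['o'] else if c = 'ú' then ['u']
  else if c.toNat ≤ 127 then [c] else []

def pvNorm (s : String) : String :=
  String.mk (((PySem.Str.lower s).toList).flatMap pvDeaccent)

-- the first for-loop of A: scan PROVINCIAS, matching norm(name) or norm(code)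
def pvScanProv (provNorm : String) : List (String × String) → Option (String × String)
  | [] => none
  | (name, code) :: rest =>
    if pvNorm name = provNorm ∨ pvNorm code = provNorm then
      some (CODE_TO_POVINCIA.getD code "", code)
    else pvScanProv provNorm rest

-- the second for-loop of A: scan PROVINCIAS_ALIAS, matching norm(alias) only
def pvScanAlias (provNorm : String) : List (String × String) → Option (String × String)
  | [] => none
  | (alias_, code) :: rest =>
    if provNorm = pvNorm alias_ then some (CODE_TO_POVINCIA.getD code "", code)
    else pvScanAlias provNorm rest

-- A's body after prov_norm = norm(provincia); the final `raise ValueError` is outside Pre_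
def pvResolveA (provNorm : String) : String × String :=
  match pvScanProv provNorm PROVINCIAS with
  | some r => r
  | none => (pvScanAlias provNorm PROVINCIAS_ALIAS).getD ("", "")

def get_provincia_name_code (provincia : String) : String × String :=
  pvResolveA (pvNorm provincia)

-- ===== PORT B =====

-- B's module-level literal table _TABLE: normalized name/code/alias -> (resolved name, code)
def pvTableB : PySem.Dict String (String × String) := PySem.Dict.mk
  [("caba", ("CABA", "CABA")),
   ("bs as", ("Bs As", "BA")), ("ba", ("Bs As", "BA")),
   ("cordoba", ("Córdoba", "CBA")), ("cba", ("Córdoba", "CBA")),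
   ("san luis", ("San Luis", "SL")), ("sl", ("San Luis", "SL")),
   ("chaco", ("Chaco", "CHA")), ("cha", ("Chaco", "CHA")),
   ("rio negro", ("Río Negro", "RN")), ("rn", ("Río Negro", "RN")),
   ("santa fe", ("Santa Fe", "SF")), ("sf", ("Santa Fe", "SF")),
   ("tierra del f", ("Tierra del Fuego", "TF")), ("tf", ("Tierra del Fuego", "TF")),
   ("jujuy", ("Jujuy", "JY")), ("jy", ("Jujuy", "JY")),
   ("salta", ("Salta", "SAL")), ("sal", ("Salta", "SAL")),
   ("entre rios", ("Entre Ríos", "ER")), ("er", ("Entre Ríos", "ER")),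
   ("corrientes", ("Corrientes", "COR")), ("cor", ("Corrientes", "COR")),
   ("santiago est", ("Santiago del Estero", "SDE")), ("sde", ("Santiago del Estero", "SDE")),
   ("neuquen", ("Neuquén", "NQ")), ("nq", ("Neuquén", "NQ")),
   ("mendoza", ("Mendoza", "MDZ")), ("mdz", ("Mendoza", "MDZ")),
   ("tucuman", ("Tucumán", "TUC")), ("tuc", ("Tucumán", "TUC")),
   ("santa cruz", ("Santa Cruz", "SC")), ("sc", ("Santa Cruz", "SC")),
   ("chubut", ("Chubut", "CHU")), ("chu", ("Chubut", "CHU")),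
   ("misiones", ("Misiones", "MIS")), ("mis", ("Misiones", "MIS")),
   ("formosa", ("Formosa", "FOR")), ("for", ("Formosa", "FOR")),
   ("catamarca", ("Catamarca", "CAT")), ("cat", ("Catamarca", "CAT")),
   ("la rioja", ("La Rioja", "LAR")), ("lar", ("La Rioja", "LAR")),
   ("san juan", ("San Juan", "SJU")), ("sju", ("San Juan", "SJU")),
   ("la pampa", ("La Pampa", "LPA")), ("lpa", ("La Pampa", "LPA")),
   ("tierra del fuego", ("Tierra del Fuego", "TF")),
   ("santiago del estero", ("Santiago del Estero", "SDE"))]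

-- B's body: prov_norm is computed by the same normalization code (inlined in B),
-- then a single table lookup; the KeyError → ValueError re-raise is outside Pre_
def get_provincia_name_code_alt (provincia : String) : String × String :=
  (pvTableB.get? (pvNorm provincia)).getD ("", "")

-- ===== PRECONDITION & SPEC =====

-- the normalized forms on which A returns; on every other input A raises
-- (ValueError "Unknown provincia…"), so those inputs are excluded.
def Pre_get_provincia_name_code (provincia : String) : Prop :=
  pvNorm provincia ∈
    ["caba", "bs as", "ba", "cordoba", "cba", "san luis", "sl", "chaco", "cha",
     "rio negro", "rn", "santa fe", "sf", "tierra del f", "tf", "jujuy", "jy",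
     "salta", "sal", "entre rios", "er", "corrientes", "cor", "santiago est", "sde",
     "neuquen", "nq", "mendoza", "mdz", "tucuman", "tuc", "santa cruz", "sc",
     "chubut", "chu", "misiones", "mis", "formosa", "for", "catamarca", "cat",
     "la rioja", "lar", "san juan", "sju", "la pampa", "lpa",
     "tierra del fuego", "santiago del estero"]

instance (provincia : String) : Decidable (Pre_get_provincia_name_code provincia) := by
  unfold Pre_get_provincia_name_code; infer_instance

def pvWitness_get_provincia_name_code : String := "Santa Fe"

def Spec_get_provincia_name_code (provincia : String) (out : String × String) : Prop :=
  out = get_provincia_name_code_alt provincia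
instance (provincia : String) (out : String × String) : Decidable (Spec_get_provincia_name_code provincia out) := by unfold Spec_get_provincia_name_code; infer_instance

-- ===== CLAIM (what is proved, stated in full; the proofs are below) =====
def Claim_equal_get_provincia_name_code : Prop := ∀ (provincia : String), Dom_get_provincia_name_code provincia → Pre_get_provincia_name_code provincia → Spec_get_provincia_name_code provincia (get_provincia_name_code provincia)

-- ===== LEMMAS AND PROOFS =====

-- on every normalized form admitted by Pre_, A's scans and B's literal table agree
set_option maxHeartbeats 4000000 in
theorem pvResolve_agree :
    ∀ s ∈ (["caba", "bs as", "ba", "cordoba", "cba", "san luis", "sl", "chaco", "cha",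
     "rio negro", "rn", "santa fe", "sf", "tierra del f", "tf", "jujuy", "jy",
     "salta", "sal", "entre rios", "er", "corrientes", "cor", "santiago est", "sde",
     "neuquen", "nq", "mendoza", "mdz", "tucuman", "tuc", "santa cruz", "sc",
     "chubut", "chu", "misiones", "mis", "formosa", "for", "catamarca", "cat",
     "la rioja", "lar", "san juan", "sju", "la pampa", "lpa",
     "tierra del fuego", "santiago del estero"] : List String),
      pvResolveA s = (pvTableB.get? s).getD ("", "") := by
  intro s hs
  fin_cases hs <;> decide

-- ===== VERDICT (by name: the statement is the Claim_ definition above) =====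
theorem get_provincia_name_code_spec : Claim_equal_get_provincia_name_code := by
  intro provincia _ hpre
  unfold Spec_get_provincia_name_code get_provincia_name_code get_provincia_name_code_alt
  exact pvResolve_agree _ hpre
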